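-- pv_equiv track=rewrite | github.com/hmku/icpc | wi21_quals/k.py | nmax
-- ===== SOURCE A (Python) =====
-- def nmax(a, k):
--     m = -1
--     mi = -1
--     for i in range(len(a)):
--         if i == k:
--             continue
--         if a[i] > m:
--             m = a[i]
--             mi = i
--     return (m, mi)
-- ===== SOURCE B (Python) =====
-- def nmax(a, k):
--     cands = [(i, v) for i, v in enumerate(a) if i != k]
--     m = max((v for _, v in cands), default=-1)
--     if m <= -1:
--         return (-1, -1)
--     for i, v in cands:
--         if v == m:
--             return (m, i)
-- ===== Notes on version B (the rewrite author's own statement) =====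
-- stated objective: alternative
-- what changed: Replaces the single fused running-max/index loop with a two-pass decomposition: first compute the maximum of the non-excluded values (default -1) and clamp with the -1 sentinel, then separately scan for the first non-excluded index holding that maximum.
import Mathlib
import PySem

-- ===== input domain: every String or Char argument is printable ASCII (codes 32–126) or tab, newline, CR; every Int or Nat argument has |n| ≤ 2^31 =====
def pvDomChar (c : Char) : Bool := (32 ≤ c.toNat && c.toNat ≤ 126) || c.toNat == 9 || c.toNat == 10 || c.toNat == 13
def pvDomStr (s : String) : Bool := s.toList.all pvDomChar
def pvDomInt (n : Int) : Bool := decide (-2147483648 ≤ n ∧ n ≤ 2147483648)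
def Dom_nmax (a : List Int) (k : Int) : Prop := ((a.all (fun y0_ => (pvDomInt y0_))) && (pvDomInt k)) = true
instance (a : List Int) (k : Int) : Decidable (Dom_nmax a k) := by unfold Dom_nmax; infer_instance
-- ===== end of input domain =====

-- B replaces A's fused running-max/index loop with a two-pass decomposition
-- (max of the non-excluded values with the -1 sentinel, then a separate first-index
-- search for that max); alternative, same cost.

-- ===== PORT A =====
-- for i in range(len(a)): skip i == k; running max with its index, started at (-1, -1).
-- a[i] is always in range here, so pyGetD is exact.
def nmax (a : List Int) (k : Int) : Int × Int :=
  (PySem.List.pyRange 0 a.length 1).foldl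
    (fun (s : Int × Int) i =>
      if i = k then s
      else if PySem.List.pyGetD a i 0 > s.1 then (PySem.List.pyGetD a i 0, i) else s)
    (-1, -1)

-- ===== PORT B =====
-- cands = [(i, v) for i, v in enumerate(a) if i != k]
-- m = max(values, default=-1); sentinel clamp; then first (i, v) in cands with v == m.
-- (find? = the first-match loop; its none branch is unreachable since m is a value of cands.)
-- Python's max(l, default=-1) on a list of ints.
def pvMaxD : List Int → Int
  | [] => -1
  | v :: r => r.foldl max v

def nmax_alt (a : List Int) (k : Int) : Int × Int :=
  let cands := (PySem.List.enumerate a 0).filter (fun p => p.1 != k)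
  let m : Int := pvMaxD (cands.map (fun p => p.2))
  if m ≤ -1 then (-1, -1)
  else
    match cands.find? (fun p => p.2 == m) with
    | some p => (m, p.1)
    | none => (m, -1)

-- ===== PRECONDITION & SPEC =====
def Spec_nmax (a : List Int) (k : Int) (out : Int × Int) : Prop := out = nmax_alt a k
instance (a : List Int) (k : Int) (out : Int × Int) : Decidable (Spec_nmax a k out) := by unfold Spec_nmax; infer_instance

-- ===== CLAIM (what is proved, stated in full; the proofs are below) =====
def Claim_equal_nmax : Prop := ∀ (a : List Int) (k : Int), Dom_nmax a k → Spec_nmax a k (nmax a k)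

-- ===== LEMMAS AND PROOFS =====

-- A's loop body over a (index, value) pair, with the i == k skip already discharged.
def pvStep (s : Int × Int) (p : Int × Int) : Int × Int :=
  if p.2 > s.1 then (p.2, p.1) else s

-- A's fold, viewed over enumerate a, skips exactly the filtered-out pairs.
theorem pv_fold_filter (k : Int) (l : List (Int × Int)) (s : Int × Int) :
    l.foldl (fun s p => if p.1 = k then s else pvStep s p) s
      = (l.filter (fun p => p.1 != k)).foldl pvStep s := by
  induction l generalizing s with
  | nil => rfl
  | cons p t ih =>
    rw [List.foldl_cons, List.filter_cons]
    by_cases h : p.1 = k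
    · have hb : (p.1 != k) = false := by simp [h]
      rw [if_pos h]
      simp only [hb, Bool.false_eq_true, if_false]
      exact ih s
    · have hb : (p.1 != k) = true := by simp [h]
      rw [if_neg h]
      simp only [hb, if_true, List.foldl_cons]
      exact ih (pvStep s p)

theorem pv_foldl_max_max (l : List Int) (x y : Int) :
    l.foldl max (max x y) = max x (l.foldl max y) := by
  induction l generalizing y with
  | nil => rfl
  | cons a t ih =>
    simp only [List.foldl_cons, max_assoc, ih]

-- Core characterisation of A's skip-free fold as B's two passes.
theorem pv_core (l : List (Int × Int)) (m mi : Int) :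
    l.foldl pvStep (m, mi)
      = (if (l.map Prod.snd).foldl max m > m
          then ((l.map Prod.snd).foldl max m,
                (((l.find? (fun p => p.2 == (l.map Prod.snd).foldl max m)).map Prod.fst).getD mi))
          else (m, mi)) := by
  induction l generalizing m mi with
  | nil => simp
  | cons p t ih =>
    simp only [List.map_cons, List.foldl_cons]
    by_cases hp : p.2 > m
    · have hmax : max m p.2 = p.2 := by omega
      rw [hmax]
      have hub := (PySem.List.le_foldl_max (t.map Prod.snd) p.2).1
      have hM : (t.map Prod.snd).foldl max p.2 > m := by omega
      rw [if_pos hM]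
      have hstep : pvStep (m, mi) p = (p.2, p.1) := by simp [pvStep, hp]
      rw [hstep, ih]
      by_cases htop : (t.map Prod.snd).foldl max p.2 > p.2
      · have hne : (p.2 == (t.map Prod.snd).foldl max p.2) = false := by
          simp only [beq_eq_false_iff_ne, ne_eq]; omega
        rw [if_pos htop]
        simp only [List.find?_cons, hne]
        have hmem : ∃ q ∈ t, ((fun q : Int × Int => q.2 == (t.map Prod.snd).foldl max p.2) q = true) := by
          rcases PySem.List.foldl_max_mem (t.map Prod.snd) p.2 with h1 | h1
          · omega
          · rcases List.mem_map.mp h1 with ⟨q, hq, hq2⟩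
            exact ⟨q, hq, by simp [hq2]⟩
        obtain ⟨r, hr⟩ := Option.isSome_iff_exists.mp (List.find?_isSome.mpr hmem)
        rw [hr]
        simp
      · have heq : (t.map Prod.snd).foldl max p.2 = p.2 := by omega
        rw [if_neg htop, heq]
        simp only [List.find?_cons, beq_self_eq_true]
        simp
    · have hstep : pvStep (m, mi) p = (m, mi) := by simp [pvStep]; omega
      have hmax : max m p.2 = m := by omega
      rw [hstep, hmax, ih]
      by_cases hM : (t.map Prod.snd).foldl max m > m
      · have hne : (p.2 == (t.map Prod.snd).foldl max m) = false := by
          simp only [beq_eq_false_iff_ne, ne_eq]; omega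
        rw [if_pos hM, if_pos hM]
        simp only [List.find?_cons, hne]
      · rw [if_neg hM, if_neg hM]

-- A's fold rewritten over enumerate a (pyRange + pyGetD ↔ enumerate).
theorem pv_nmax_enum (a : List Int) (k : Int) :
    nmax a k
      = (PySem.List.enumerate a 0).foldl (fun s p => if p.1 = k then s else pvStep s p) (-1, -1) := by
  unfold nmax
  rw [PySem.List.enumerate_eq_map_pyRange (d := 0), List.foldl_map]
  simp [pvStep]

theorem nmax_eq_alt (a : List Int) (k : Int) : nmax a k = nmax_alt a k := by
  rw [pv_nmax_enum, pv_fold_filter, pv_core]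
  unfold nmax_alt
  set cands := (PySem.List.enumerate a 0).filter (fun p => p.1 != k) with hc
  cases cands with
  | nil => simp [pvMaxD]
  | cons c t =>
    simp only [List.map_cons, pvMaxD, List.foldl_cons]
    have hM : (t.map Prod.snd).foldl max (max (-1) c.2)
        = max (-1) ((t.map Prod.snd).foldl max c.2) :=
      pv_foldl_max_max (t.map Prod.snd) (-1) c.2
    by_cases hb : (t.map Prod.snd).foldl max c.2 ≤ -1
    · rw [if_neg (by omega), if_pos hb]
    · have hMe : (t.map Prod.snd).foldl max (max (-1) c.2)
          = (t.map Prod.snd).foldl max c.2 := by omega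
      rw [if_pos (by omega), hMe, if_neg hb]
      cases hf : (c :: t).find? (fun p => p.2 == (t.map Prod.snd).foldl max c.2) <;> simp_all

-- ===== VERDICT (by name: the statement is the Claim_ definition above) =====
theorem nmax_spec : Claim_equal_nmax := by
  intro a k _
  exact nmax_eq_alt a k
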